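-- pv_equiv track=rewrite | github.com/zapperedge-prabhu/ZapperMsgParser | fhir_parser.py | _telecom
-- ===== SOURCE A (Python) =====
-- def _telecom(telecom_list: list) -> dict:
--     """Extract phone, email, fax from telecom list."""
--     result = {}
--     for t in (telecom_list or []):
--         sys = t.get("system", "")
--         val = t.get("value", "")
--         if sys and sys not in result:
--             result[sys] = val
--     return result
-- ===== SOURCE B (Python) =====
-- def _telecom(telecom_list: list) -> dict:
--     """Extract phone, email, fax from telecom list.
--
--     Recursive decomposition: take the head entry, drop every later entry
--     with the same system, and recurse on the rest -- no membership test
--     against the accumulated dict is ever needed.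
--     """
--     lst = list(telecom_list or [])
--     if not lst:
--         return {}
--     head, tail = lst[0], lst[1:]
--     sys = head.get("system", "")
--     rest = _telecom([u for u in tail if u.get("system", "") != sys])
--     if not sys:
--         return rest
--     return {sys: head.get("value", ""), **rest}
-- ===== Notes on version B (the rewrite author's own statement) =====
-- stated objective: alternative
-- what changed: Replaced the forward loop with a dict-membership guard by head/tail recursion that filters all later entries sharing the head's system before recursing, so no accumulator membership test exists.
import Mathlib
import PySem

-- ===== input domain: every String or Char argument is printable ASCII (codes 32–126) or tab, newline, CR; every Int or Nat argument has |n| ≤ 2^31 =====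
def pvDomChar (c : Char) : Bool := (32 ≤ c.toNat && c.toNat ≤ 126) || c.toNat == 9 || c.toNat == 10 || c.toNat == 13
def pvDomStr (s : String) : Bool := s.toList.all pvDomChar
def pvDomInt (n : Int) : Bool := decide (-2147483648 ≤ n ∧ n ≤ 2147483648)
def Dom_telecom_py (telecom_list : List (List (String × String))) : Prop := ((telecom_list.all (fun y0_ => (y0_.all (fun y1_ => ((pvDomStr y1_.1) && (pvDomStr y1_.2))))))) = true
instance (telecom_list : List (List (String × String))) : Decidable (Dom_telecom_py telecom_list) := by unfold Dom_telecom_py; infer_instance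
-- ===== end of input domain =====

-- B replaces the membership-guarded forward dict build by head/tail recursion that
-- filters duplicates of the head's system out of the tail (alternative decomposition).

-- shared field accessors: t.get("system", "") / t.get("value", "") on an assoc-list dict
-- (first match, exactly Python's dict lookup for the insertion-order convention)
def pvKey (t : List (String × String)) : String := (t.lookup "system").getD ""
def pvVal (t : List (String × String)) : String := (t.lookup "value").getD ""

-- ===== PORT A =====
-- loop body: if sys and sys not in result: result[sys] = val
def pvStep (r : PySem.Dict String String) (t : List (String × String)) : PySem.Dict String String :=
  let s := pvKey t
  let v := pvVal t
  if s ≠ "" ∧ r.contains s = false then r.insert s v else r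

def telecom_py (telecom_list : List (List (String × String))) : List (String × String) :=
  (telecom_list.foldl pvStep PySem.Dict.empty).items

-- ===== PORT B =====
def pvBRec : List (List (String × String)) → List (String × String)
  | [] => []
  | t :: ts =>
    let s := pvKey t
    let rest := pvBRec (ts.filter (fun u => pvKey u != s))
    if s = "" then rest else (s, pvVal t) :: rest
termination_by l => l.length
decreasing_by
  simpa using Nat.lt_succ_of_le (List.length_filter_le _ _)

def telecom_py_alt (telecom_list : List (List (String × String))) : List (String × String) :=
  pvBRec telecom_list

-- ===== PRECONDITION & SPEC =====
def Spec_telecom_py (telecom_list : List (List (String × String))) (out : List (String × String)) : Prop := out = telecom_py_alt telecom_list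
instance (telecom_list : List (List (String × String))) (out : List (String × String)) : Decidable (Spec_telecom_py telecom_list out) := by unfold Spec_telecom_py; infer_instance

-- ===== CLAIM (what is proved, stated in full; the proofs are below) =====
def Claim_equal_telecom_py : Prop := ∀ (telecom_list : List (List (String × String))), Dom_telecom_py telecom_list → Spec_telecom_py telecom_list (telecom_py telecom_list)

-- ===== LEMMAS AND PROOFS =====

-- pvBRec ignores entries whose system is ""
theorem pvBRec_filter_ne_empty : ∀ (n : Nat) (l : List (List (String × String))), l.length ≤ n →
    pvBRec (l.filter (fun u => pvKey u != "")) = pvBRec l := by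
  intro n
  induction n with
  | zero =>
    intro l hl
    have : l = [] := List.eq_nil_of_length_eq_zero (Nat.le_zero.mp hl)
    subst this; rfl
  | succ n ih =>
    intro l hl
    match l with
    | [] => rfl
    | t :: ts =>
      have hts : ts.length ≤ n := Nat.le_of_succ_le_succ hl
      by_cases hs : pvKey t = ""
      · have hL : List.filter (fun u => pvKey u != "") (t :: ts)
            = List.filter (fun u => pvKey u != "") ts := by
          rw [List.filter_cons, if_neg (by simp [hs])]
        have hR : pvBRec (t :: ts) = pvBRec (List.filter (fun u => pvKey u != "") ts) := by
          rw [pvBRec, if_pos hs]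
          simp only [hs]
        rw [hL, hR]
      · rw [List.filter_cons, if_pos (by simp [hs])]
        rw [pvBRec, pvBRec]
        simp only [hs]
        have h2 : pvBRec (List.filter (fun u => pvKey u != pvKey t) (List.filter (fun u => pvKey u != "") ts))
            = pvBRec (List.filter (fun u => pvKey u != pvKey t) ts) := by
          rw [List.filter_filter]
          rw [List.filter_congr (fun u _ => Bool.and_comm (pvKey u != pvKey t) (pvKey u != ""))]
          rw [← List.filter_filter]
          exact ih _ (Nat.le_trans (List.length_filter_le _ _) hts)
        rw [h2]

theorem contains_false_of_empty_not_key (r : PySem.Dict String String)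
    (hkeys : ∀ k ∈ r.keys, k ≠ "") : r.contains "" = false := by
  by_contra h
  have : r.contains "" = true := by revert h; cases r.contains "" <;> simp
  have : "" ∈ r.keys := (PySem.Dict.contains_iff_mem_keys r "").mp this
  exact (hkeys _ this) rfl

theorem foldl_pvStep_eq (n : Nat) : ∀ (ts : List (List (String × String))) (r : PySem.Dict String String),
    ts.length ≤ n → r.keys.Nodup → (∀ k ∈ r.keys, k ≠ "") →
    (ts.foldl pvStep r).items = r.items ++ pvBRec (ts.filter (fun u => !(r.contains (pvKey u)))) := by
  induction n with
  | zero =>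
    intro ts r hl _ _
    have : ts = [] := List.eq_nil_of_length_eq_zero (Nat.le_zero.mp hl)
    subst this; simp [pvBRec]
  | succ n ih =>
    intro ts r hl hnd hkeys
    match ts with
    | [] => simp [pvBRec]
    | t :: ts' =>
      have hts : ts'.length ≤ n := Nat.le_of_succ_le_succ hl
      by_cases hs : pvKey t = ""
      · -- condition false; t passes the filter with "" key, pvBRec skips it
        have hc : r.contains (pvKey t) = false := by rw [hs]; exact contains_false_of_empty_not_key r hkeys
        simp only [List.foldl_cons, pvStep, hs]
        rw [if_neg (by simp)]
        rw [ih ts' r hts hnd hkeys]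
        congr 1
        rw [List.filter_cons, if_pos (by simp [hc])]
        conv_rhs => rw [pvBRec]
        rw [if_pos hs]
        have he : (fun u => pvKey u != pvKey t) = (fun u => pvKey u != "") := by
          funext u; rw [hs]
        rw [he]
        exact (pvBRec_filter_ne_empty _ _ (Nat.le_refl _)).symm
      · by_cases hc : r.contains (pvKey t) = true
        · -- already present: skipped on both sides
          simp only [List.foldl_cons, pvStep]
          rw [if_neg (by simp [hc])]
          rw [ih ts' r hts hnd hkeys]
          congr 2
          simp [hc]
        · have hc' : r.contains (pvKey t) = false := by revert hc; cases r.contains (pvKey t) <;> simp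
          simp only [List.foldl_cons, pvStep]
          rw [if_pos ⟨hs, hc'⟩]
          have hkeys' : (r.insert (pvKey t) (pvVal t)).keys = r.keys ++ [pvKey t] :=
            PySem.Dict.keys_insert_of_not_contains _ _ hc'
          have hnd' : (r.insert (pvKey t) (pvVal t)).keys.Nodup := PySem.Dict.nodup_keys_insert _ _ _ hnd
          have hne' : ∀ k ∈ (r.insert (pvKey t) (pvVal t)).keys, k ≠ "" := by
            intro k hk
            rw [hkeys'] at hk
            rcases List.mem_append.mp hk with h | h
            · exact hkeys k h
            · simp at h; subst h; exact hs
          rw [ih ts' _ hts hnd' hne']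
          rw [PySem.Dict.items_insert_of_not_contains _ _ hc']
          rw [List.append_assoc]
          congr 1
          rw [List.filter_cons, if_pos (by simp [hc'])]
          conv_rhs => rw [pvBRec]
          simp only [hs]
          simp only [List.singleton_append]
          congr 1
          rw [List.filter_filter]
          congr 1
          apply List.filter_congr
          intro u _
          rw [PySem.Dict.contains_insert]
          cases h1 : pvKey u == pvKey t <;> cases h2 : r.contains (pvKey u) <;> simp [h1, h2, bne]

-- ===== VERDICT (by name: the statement is the Claim_ definition above) =====
theorem telecom_py_spec : Claim_equal_telecom_py := by
  intro l _
  unfold Spec_telecom_py telecom_py telecom_py_alt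
  rw [foldl_pvStep_eq l.length l PySem.Dict.empty (Nat.le_refl _) (by simp [PySem.Dict.empty, PySem.Dict.keys]) (by simp [PySem.Dict.empty, PySem.Dict.keys])]
  simp [PySem.Dict.empty]
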